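-- pv_equiv track=rewrite | github.com/dnebauer/dotfiles-qute | .local/share/qutebrowser/userscripts/SaveMarkdown.py | _simple_attrs
-- ===== SOURCE A (Python) =====
-- def _simple_attrs(attrs):    # {{{2
--     # convert attributes to string
--     # pylint: disable=no-self-use
--     # too difficult to move from object
--     if not attrs:
--         return u""
--
--     attr_arr = []
--     lattrs = attrs.copy()
--     if 'id' in lattrs:
--         attr_arr.append("#%s" % lattrs['id'])
--         del lattrs['id']
--     if 'class' in lattrs:
--         # pylint: disable=expression-not-assigned
--         [attr_arr.append(sv) for sv in lattrs['class'].split()]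
--         del lattrs['class']
--
--     for key, value in lattrs.items():
--         use_sep = False
--         for content in (' ', ':', '-', ';'):
--             if value.find(content) > -1:
--                 use_sep = True
--                 break
--         if use_sep:
--             attr_arr.append("%s='%s'" % (key, value))
--         else:
--             attr_arr.append("%s=%s" % (key, value))
--     return u"{{%s}}" % " ".join(attr_arr)
-- ===== SOURCE B (Python) =====
-- def _simple_attrs(attrs):
--     # sort-then-emit: stable-sort the items by a rank (id -> 0, class -> 1,
--     # anything else -> 2), then emit each item's token(s) in that order.
--     # Correct because Python's sort is stable: the id token comes first,
--     # class tokens second, and the remaining pairs keep insertion order.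
--     if not attrs:
--         return u""
--     rank = {'id': 0, 'class': 1}
--     tokens = []
--     for key, value in sorted(attrs.items(), key=lambda kv: rank.get(kv[0], 2)):
--         if key == 'id':
--             tokens.append('#' + value)
--         elif key == 'class':
--             tokens.extend(value.split())
--         else:
--             quote = "'" if any(ch in " :-;" for ch in value) else ""
--             tokens.append(key + '=' + quote + value + quote)
--     return "{{" + " ".join(tokens) + "}}"
-- ===== Notes on version B (the rewrite author's own statement) =====
-- stated objective: alternative
-- what changed: Replaced A's copy-the-dict / delete-id-and-class / loop-over-the-remainder scheme by a stable sort of the items under a rank key (id=0, class=1, other=2) followed by one emit pass, with the separator test done as a per-character scan (any(ch in " :-;" for ch in value)) instead of per-substring find()>-1.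
import Mathlib
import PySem

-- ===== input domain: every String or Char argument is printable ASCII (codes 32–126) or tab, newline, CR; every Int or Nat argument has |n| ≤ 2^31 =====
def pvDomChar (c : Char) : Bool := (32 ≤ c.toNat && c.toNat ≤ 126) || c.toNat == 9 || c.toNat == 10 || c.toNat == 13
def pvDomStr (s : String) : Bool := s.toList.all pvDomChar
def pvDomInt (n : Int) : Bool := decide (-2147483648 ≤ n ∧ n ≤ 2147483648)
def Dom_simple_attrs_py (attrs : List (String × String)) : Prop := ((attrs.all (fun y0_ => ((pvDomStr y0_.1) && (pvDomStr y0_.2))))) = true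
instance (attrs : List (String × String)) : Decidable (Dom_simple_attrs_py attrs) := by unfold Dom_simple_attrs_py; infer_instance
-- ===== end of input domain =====

-- B replaces A's copy/del-the-dict scheme by a stable sort of the items under a rank key
-- (id=0, class=1, other=2) followed by one emit pass (objective: alternative).

-- ===== PORT A =====
-- A's inner "for content in (' ', ':', '-', ';'): if value.find(content) > -1: … break" loop
def pvUseSepA : List String → String → Bool
  | [], _ => false
  | c :: cs, v => if PySem.Str.find v c > -1 then true else pvUseSepA cs v

def simple_attrs_py (attrs : List (String × String)) : String :=
  if attrs = [] then "" else
  let attr_arr : List String := []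
  let lattrs : PySem.Dict String String := PySem.Dict.mk attrs
  let attr_arr := if lattrs.contains "id" then attr_arr ++ ["#" ++ lattrs.getD "id" ""] else attr_arr
  let lattrs := if lattrs.contains "id" then lattrs.erase "id" else lattrs
  let attr_arr := if lattrs.contains "class" then attr_arr ++ PySem.Str.split₀ (lattrs.getD "class" "") else attr_arr
  let lattrs := if lattrs.contains "class" then lattrs.erase "class" else lattrs
  let attr_arr := lattrs.items.foldl (fun acc kv =>
      if pvUseSepA [" ", ":", "-", ";"] kv.2 then acc ++ [kv.1 ++ "='" ++ kv.2 ++ "'"]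
      else acc ++ [kv.1 ++ "=" ++ kv.2]) attr_arr
  "{{" ++ PySem.Str.join " " attr_arr ++ "}}"

-- ===== PORT B =====
-- B's rank.get(kv[0], 2)
def pvRankB (k : String) : Int :=
  (PySem.Dict.mk [("id", (0 : Int)), ("class", 1)]).getD k 2

-- B's "any(ch in ' :-;' for ch in value)"
def pvQuoteB (v : String) : Bool := v.toList.any (fun ch => (" :-;".toList).contains ch)

def simple_attrs_py_alt (attrs : List (String × String)) : String :=
  if attrs = [] then "" else
  let ordered := PySem.List.sorted attrs (fun kv => pvRankB kv.1)
  let tokens := ordered.foldl (fun (acc : List String) kv =>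
      if kv.1 = "id" then acc ++ ["#" ++ kv.2]
      else if kv.1 = "class" then acc ++ PySem.Str.split₀ kv.2
      else
        let quote := if pvQuoteB kv.2 then "'" else ""
        acc ++ [kv.1 ++ "=" ++ quote ++ kv.2 ++ quote]) []
  "{{" ++ PySem.Str.join " " tokens ++ "}}"

-- ===== PRECONDITION & SPEC =====
-- Pre_ excludes association lists with duplicate keys: they cannot arise from A's Python
-- dict argument (dict construction collapses duplicates), so the assoc-list ports'
-- behaviour on them is unspecified.
def Pre_simple_attrs_py (attrs : List (String × String)) : Prop := (attrs.map Prod.fst).Nodup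
instance (attrs : List (String × String)) : Decidable (Pre_simple_attrs_py attrs) := by unfold Pre_simple_attrs_py; infer_instance
def pvWitness_simple_attrs_py : (List (String × String)) := [("id", "top"), ("class", "a b"), ("k", "v:w")]

def Spec_simple_attrs_py (attrs : List (String × String)) (out : String) : Prop := out = simple_attrs_py_alt attrs
instance (attrs : List (String × String)) (out : String) : Decidable (Spec_simple_attrs_py attrs out) := by unfold Spec_simple_attrs_py; infer_instance

-- ===== CLAIM (what is proved, stated in full; the proofs are below) =====
def Claim_equal_simple_attrs_py : Prop := ∀ (attrs : List (String × String)), Dom_simple_attrs_py attrs → Pre_simple_attrs_py attrs → Spec_simple_attrs_py attrs (simple_attrs_py attrs)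

-- ===== LEMMAS AND PROOFS =====

-- rank as a plain case split
theorem pvRankB_eq (k : String) :
    pvRankB k = if k = "id" then 0 else if k = "class" then 1 else 2 := by
  by_cases h1 : k = "id"
  · simp [pvRankB, h1, PySem.Dict.getD, PySem.Dict.get?]
  · by_cases h2 : k = "class"
    · simp [pvRankB, h2, PySem.Dict.getD, PySem.Dict.get?]
    · simp [pvRankB, h1, h2, PySem.Dict.getD, PySem.Dict.get?,
        beq_eq_false_iff_ne.2 (Ne.symm h1), beq_eq_false_iff_ne.2 (Ne.symm h2)]

theorem pvRankB_cases (k : String) : pvRankB k = 0 ∨ pvRankB k = 1 ∨ pvRankB k = 2 := by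
  rw [pvRankB_eq]; split_ifs <;> simp

theorem pvRankB_eq_zero_iff (k : String) : pvRankB k = 0 ↔ k = "id" := by
  rw [pvRankB_eq]; split_ifs with h1 h2
  · simp [h1]
  · simp [h1]
  · simp [h1]

theorem pvRankB_eq_one_iff (k : String) : pvRankB k = 1 ↔ k = "class" := by
  rw [pvRankB_eq]; split_ifs with h1 h2
  · rw [h1]; decide
  · simp [h2]
  · simp [h2]

-- insertBy skips a prefix it is not 'before'
theorem insertBy_append_not {α : Type} (before : α → α → Bool) (x : α) (ys zs : List α)
    (h : ∀ y ∈ ys, before x y = false) :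
    PySem.List.insertBy before x (ys ++ zs) = ys ++ PySem.List.insertBy before x zs := by
  induction ys with
  | nil => simp
  | cons y ys ih =>
    have hy : before x y = false := h y (by simp)
    simp only [List.cons_append, PySem.List.insertBy, hy]
    simp [ih (fun a ha => h a (by simp [ha]))]

-- insertBy goes to the front of a block it is 'before'
theorem insertBy_eq_cons {α : Type} (before : α → α → Bool) (x : α) (zs : List α)
    (h : ∀ z ∈ zs, before x z = true) :
    PySem.List.insertBy before x zs = x :: zs := by
  cases zs with
  | nil => rfl
  | cons z zs => simp [PySem.List.insertBy, h z (by simp)]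

-- the stable insertion sort by the 3-valued rank, characterised by the three rank filters
theorem foldl_insertBy_rank (l a b c : List (String × String))
    (ha : ∀ y ∈ a, pvRankB y.1 = 0) (hb : ∀ y ∈ b, pvRankB y.1 = 1) (hc : ∀ y ∈ c, pvRankB y.1 = 2) :
    l.foldl (fun acc x => PySem.List.insertBy
        (fun p q => decide (pvRankB p.1 < pvRankB q.1)) x acc) (a ++ b ++ c)
    = (a ++ l.filter (fun kv => pvRankB kv.1 == 0))
      ++ (b ++ l.filter (fun kv => pvRankB kv.1 == 1))
      ++ (c ++ l.filter (fun kv => pvRankB kv.1 == 2)) := by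
  induction l generalizing a b c with
  | nil => simp
  | cons x l ih =>
    simp only [List.foldl_cons]
    rcases pvRankB_cases x.1 with hx | hx | hx
    · have hins : PySem.List.insertBy (fun p q => decide (pvRankB p.1 < pvRankB q.1)) x (a ++ b ++ c)
          = (a ++ [x]) ++ b ++ c := by
        rw [List.append_assoc, insertBy_append_not _ _ a (b ++ c)
          (by intro y hy; simp [hx, ha y hy]),
          insertBy_eq_cons _ _ (b ++ c)
          (by intro z hz
              rcases List.mem_append.1 hz with h | h
              · simp [hx, hb z h]
              · simp [hx, hc z h])]
        simp
      rw [hins, ih (a ++ [x]) b c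
        (by intro y hy
            rcases List.mem_append.1 hy with h | h
            · exact ha y h
            · simpa [List.mem_singleton.1 h] using hx) hb hc]
      simp [hx]
    · have hins : PySem.List.insertBy (fun p q => decide (pvRankB p.1 < pvRankB q.1)) x (a ++ b ++ c)
          = a ++ (b ++ [x]) ++ c := by
        rw [insertBy_append_not _ _ (a ++ b) c
          (by intro y hy
              rcases List.mem_append.1 hy with h | h
              · simp [hx, ha y h]
              · simp [hx, hb y h]),
          insertBy_eq_cons _ _ c (by intro z hz; simp [hx, hc z hz])]
        simp
      rw [hins, ih a (b ++ [x]) c ha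
        (by intro y hy
            rcases List.mem_append.1 hy with h | h
            · exact hb y h
            · simpa [List.mem_singleton.1 h] using hx) hc]
      simp [hx]
    · have hins : PySem.List.insertBy (fun p q => decide (pvRankB p.1 < pvRankB q.1)) x (a ++ b ++ c)
          = a ++ b ++ (c ++ [x]) := by
        rw [PySem.List.insertBy_of_forall_not_before _ _ (a ++ b ++ c)
          (by intro y hy
              rcases List.mem_append.1 hy with h | h
              · rcases List.mem_append.1 h with h' | h'
                · simp [hx, ha y h']
                · simp [hx, hb y h']
              · simp [hx, hc y h])]
        simp
      rw [hins, ih a b (c ++ [x]) ha hb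
        (by intro y hy
            rcases List.mem_append.1 hy with h | h
            · exact hc y h
            · simpa [List.mem_singleton.1 h] using hx)]
      simp [hx]

theorem sorted_rank_eq (l : List (String × String)) :
    PySem.List.sorted l (fun kv => pvRankB kv.1)
      = l.filter (fun kv => pvRankB kv.1 == 0)
        ++ l.filter (fun kv => pvRankB kv.1 == 1)
        ++ l.filter (fun kv => pvRankB kv.1 == 2) := by
  rw [PySem.List.sorted_eq_foldl_insertBy]
  simpa using foldl_insertBy_rank l [] [] [] (by simp) (by simp) (by simp)

-- the token(s) one item contributes in B
def pvTokB (kv : String × String) : List String :=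
  if kv.1 = "id" then ["#" ++ kv.2]
  else if kv.1 = "class" then PySem.Str.split₀ kv.2
  else
    let quote := if pvQuoteB kv.2 then "'" else ""
    [kv.1 ++ "=" ++ quote ++ kv.2 ++ quote]

theorem foldB_flatMap (l : List (String × String)) (acc : List String) :
    l.foldl (fun (acc : List String) kv =>
      if kv.1 = "id" then acc ++ ["#" ++ kv.2]
      else if kv.1 = "class" then acc ++ PySem.Str.split₀ kv.2
      else
        let quote := if pvQuoteB kv.2 then "'" else ""
        acc ++ [kv.1 ++ "=" ++ quote ++ kv.2 ++ quote]) acc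
    = acc ++ l.flatMap pvTokB := by
  induction l generalizing acc with
  | nil => simp
  | cons kv l ih =>
    simp only [List.foldl_cons, List.flatMap_cons, pvTokB]
    split_ifs with h1 h2 h3
    · rw [ih]; simp
    · rw [ih]; simp
    · rw [ih]; simp
    · rw [ih]; simp

-- A's separator test equals B's per-character test
theorem find_gt_iff_isIn (v c : String) : (PySem.Str.find v c > -1) ↔ PySem.Str.isIn c v = true := by
  rw [PySem.Str.isIn_iff_infix, ← PySem.Str.find_nonneg_iff]; omega

theorem isIn_single (s : String) (c : Char) (hs : s.toList = [c]) (v : String) :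
    PySem.Str.isIn s v = v.toList.contains c := by
  rcases hm : v.toList.contains c with _ | _
  · rcases hi : PySem.Str.isIn s v with _ | _
    · rfl
    · rw [PySem.Str.isIn_iff_infix, hs] at hi
      have : c ∈ v.toList := (List.singleton_sublist).1 hi.sublist
      simp [this] at hm
  · have hmem : c ∈ v.toList := by simpa using hm
    obtain ⟨ys, zs, hv⟩ := List.append_of_mem hmem
    exact (PySem.Str.isIn_iff_infix s v).mpr (by rw [hs, hv]; exact ⟨ys, zs, by simp⟩)

theorem useSepA_any (v : String) (cs : List String) :
    pvUseSepA cs v = cs.any (fun c => PySem.Str.isIn c v) := by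
  induction cs with
  | nil => rfl
  | cons c cs ih =>
    simp only [pvUseSepA, List.any_cons]
    split_ifs with h
    · rw [(find_gt_iff_isIn v c).1 h]; rfl
    · have hb : PySem.Str.isIn c v = false := by
        rcases hb : PySem.Str.isIn c v with _ | _
        · rfl
        · exact absurd ((find_gt_iff_isIn v c).2 hb) h
      rw [hb, ih]; rfl

theorem useSepA_eq_quoteB (v : String) : pvUseSepA [" ", ":", "-", ";"] v = pvQuoteB v := by
  rw [useSepA_any]
  unfold pvQuoteB
  have h4 : (" :-;".toList) = [' ', ':', '-', ';'] := by decide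
  rw [h4]
  simp only [List.any_cons, List.any_nil, Bool.or_false,
    isIn_single " " ' ' (by decide) v, isIn_single ":" ':' (by decide) v,
    isIn_single "-" '-' (by decide) v, isIn_single ";" ';' (by decide) v]
  rw [Bool.eq_iff_iff]
  simp only [Bool.or_eq_true, List.contains_eq_mem, decide_eq_true_eq,
    List.any_eq_true, List.mem_cons, List.not_mem_nil, or_false]
  constructor
  · rintro (h | h | h | h)
    · exact ⟨' ', h, by simp⟩
    · exact ⟨':', h, by simp⟩
    · exact ⟨'-', h, by simp⟩
    · exact ⟨';', h, by simp⟩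
  · rintro ⟨ch, hch, rfl | rfl | rfl | rfl⟩ <;> simp [hch]

-- the formatting both programs apply to a non-id, non-class pair (stated in A's shape)
def pvFmt (kv : String × String) : String :=
  if pvQuoteB kv.2 then kv.1 ++ "='" ++ kv.2 ++ "'" else kv.1 ++ "=" ++ kv.2

theorem fmt_eq_tokB (kv : String × String) (h1 : ¬ kv.1 = "id") (h2 : ¬ kv.1 = "class") :
    pvTokB kv = [pvFmt kv] := by
  unfold pvTokB pvFmt
  simp only [h1, h2, if_false]
  split_ifs with h
  · have hq : ("='" : String) = "=" ++ "'" := by decide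
    rw [hq]
    simp [String.append_assoc]
  · simp

-- with nodup keys, filtering for one key keeps exactly the find? result
theorem filter_eq_find?_toList (l : List (String × String)) (k : String)
    (h : (l.map Prod.fst).Nodup) :
    l.filter (fun p => p.1 == k) = (l.find? (fun p => p.1 == k)).toList := by
  induction l with
  | nil => rfl
  | cons a l ih =>
    simp only [List.map_cons, List.nodup_cons] at h
    by_cases ha : a.1 = k
    · have hnone : l.filter (fun p => p.1 == k) = [] := by
        apply List.filter_eq_nil_iff.2
        intro p hp hpk
        have : p.1 = a.1 := by rw [ha]; simpa using hpk
        exact h.1 (this ▸ List.mem_map_of_mem hp)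
      simp [ha, hnone]
    · simp [ha, ih h.2]

-- A's "if k in d: use d[k]" block, as a flatMap over the (≤ 1 element) filter
theorem bucket_eq (l : List (String × String)) (k : String)
    (h : (l.map Prod.fst).Nodup) (f : String → List String) :
    (if (PySem.Dict.mk l).contains k then f ((PySem.Dict.mk l).getD k "") else [])
      = (l.filter (fun p => p.1 == k)).flatMap (fun p => f p.2) := by
  rw [filter_eq_find?_toList l k h]
  simp only [PySem.Dict.contains, PySem.Dict.getD, PySem.Dict.get?]
  rcases hf : l.find? (fun p => p.1 == k) with _ | ⟨a, b⟩
  · have : l.any (fun p => p.1 == k) = false := by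
      rw [List.any_eq_false]
      intro x hx
      simpa using List.find?_eq_none.1 hf x hx
    rw [this, hf]; rfl
  · have : l.any (fun p => p.1 == k) = true := by
      rw [List.any_eq_true]
      have := List.find?_some hf
      exact ⟨(a, b), List.mem_of_find?_eq_some hf, this⟩
    simp [this, hf]

theorem bucket_id (l : List (String × String)) (h : (l.map Prod.fst).Nodup) :
    (if (PySem.Dict.mk l).contains "id" then ["#" ++ (PySem.Dict.mk l).getD "id" ""] else [])
      = (l.filter (fun p => p.1 == "id")).flatMap (fun p => ["#" ++ p.2]) :=
  bucket_eq l "id" h (fun v => ["#" ++ v])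

theorem bucket_class (l : List (String × String)) (h : (l.map Prod.fst).Nodup) :
    (if (PySem.Dict.mk l).contains "class" then PySem.Str.split₀ ((PySem.Dict.mk l).getD "class" "") else [])
      = (l.filter (fun p => p.1 == "class")).flatMap (fun p => PySem.Str.split₀ p.2) :=
  bucket_eq l "class" h PySem.Str.split₀

-- A's "if k in d: del d[k]" block (erase filters; when k is absent the filter is the identity)
theorem erase_if (l : List (String × String)) (k : String) :
    (if (PySem.Dict.mk l).contains k then (PySem.Dict.mk l).erase k else PySem.Dict.mk l)
      = PySem.Dict.mk (l.filter (fun p => !(p.1 == k))) := by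
  split_ifs with h
  · rfl
  · simp only [PySem.Dict.contains, List.any_eq_true, not_exists] at h
    congr 1
    rw [Eq.comm, List.filter_eq_self]
    intro p hp
    rcases hk : (p.1 == k) with _ | _
    · rfl
    · exact absurd ⟨hp, hk⟩ (h p)

theorem if_append_right {c : Prop} [Decidable c] (X s : List String) :
    (if c then X ++ s else X) = X ++ (if c then s else []) := by
  split_ifs <;> simp

theorem nodup_filter_fst (l : List (String × String)) (q : String × String → Bool)
    (h : (l.map Prod.fst).Nodup) : ((l.filter q).map Prod.fst).Nodup :=
  h.sublist (List.Sublist.map Prod.fst (List.filter_sublist (l := l) (p := q)))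

theorem filter_filter_class (l : List (String × String)) :
    (l.filter (fun p => !(p.1 == "id"))).filter (fun p => p.1 == "class")
      = l.filter (fun kv => kv.1 == "class") := by
  rw [List.filter_filter]
  apply List.filter_congr
  intro p _
  rcases h : (p.1 == "class") with _ | _
  · rfl
  · have hp : p.1 = "class" := by simpa using h
    simp [hp]

theorem filter_filter_rest (l : List (String × String)) :
    (l.filter (fun p => !(p.1 == "id"))).filter (fun p => !(p.1 == "class"))
      = l.filter (fun kv => !(kv.1 == "id") && !(kv.1 == "class")) := by
  rw [List.filter_filter]
  apply List.filter_congr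
  intro p _
  exact Bool.and_comm _ _

-- B's three rank filters are the key filters
theorem filter_rank0 (l : List (String × String)) :
    l.filter (fun kv => pvRankB kv.1 == 0) = l.filter (fun kv => kv.1 == "id") := by
  apply List.filter_congr
  intro p _
  rcases h : (p.1 == "id") with _ | _ <;>
    simp_all [pvRankB_eq_zero_iff]

theorem filter_rank1 (l : List (String × String)) :
    l.filter (fun kv => pvRankB kv.1 == 1) = l.filter (fun kv => kv.1 == "class") := by
  apply List.filter_congr
  intro p _
  rcases h : (p.1 == "class") with _ | _ <;>
    simp_all [pvRankB_eq_one_iff]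

theorem filter_rank2 (l : List (String × String)) :
    l.filter (fun kv => pvRankB kv.1 == 2) = l.filter (fun kv => !(kv.1 == "id") && !(kv.1 == "class")) := by
  apply List.filter_congr
  intro p _
  rw [pvRankB_eq]
  split_ifs with h1 h2
  · simp [h1]
  · simp [h2]
  · simp [h1, h2]

-- pvTokB evaluated on each bucket
theorem flatMap_tokB_id (l : List (String × String)) :
    (l.filter (fun kv => kv.1 == "id")).flatMap pvTokB
      = (l.filter (fun kv => kv.1 == "id")).flatMap (fun p => ["#" ++ p.2]) := by
  apply List.flatMap_congr
  intro p hp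
  have : p.1 = "id" := by simpa using (List.mem_filter.1 hp).2
  simp [pvTokB, this]

theorem flatMap_tokB_class (l : List (String × String)) :
    (l.filter (fun kv => kv.1 == "class")).flatMap pvTokB
      = (l.filter (fun kv => kv.1 == "class")).flatMap (fun p => PySem.Str.split₀ p.2) := by
  apply List.flatMap_congr
  intro p hp
  have h : p.1 = "class" := by simpa using (List.mem_filter.1 hp).2
  by_cases hid : p.1 = "id"
  · rw [hid] at h; exact absurd h (by decide)
  · simp [pvTokB, h]

theorem flatMap_tokB_rest (l : List (String × String)) :
    (l.filter (fun kv => !(kv.1 == "id") && !(kv.1 == "class"))).flatMap pvTokB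
      = (l.filter (fun kv => !(kv.1 == "id") && !(kv.1 == "class"))).map pvFmt := by
  rw [← List.flatMap_singleton' ((l.filter (fun kv => !(kv.1 == "id") && !(kv.1 == "class"))).map pvFmt),
      List.flatMap_map]
  apply List.flatMap_congr
  intro p hp
  have h := (List.mem_filter.1 hp).2
  simp only [Bool.and_eq_true, Bool.not_eq_true', beq_eq_false_iff_ne, ne_eq] at h
  exact fmt_eq_tokB p h.1 h.2

-- ===== VERDICT (by name: the statement is the Claim_ definition above) =====
theorem simple_attrs_py_spec : Claim_equal_simple_attrs_py := by
  intro attrs _hdom hpre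
  unfold Pre_simple_attrs_py at hpre
  unfold Spec_simple_attrs_py simple_attrs_py simple_attrs_py_alt
  rcases heq : attrs with _ | ⟨kv0, rest0⟩
  · rfl
  rw [← heq]
  have hne : ¬ (attrs = []) := by rw [heq]; simp
  simp only [hne, if_false]
  rw [sorted_rank_eq, foldB_flatMap, List.flatMap_append, List.flatMap_append,
      filter_rank0, filter_rank1, filter_rank2,
      flatMap_tokB_id, flatMap_tokB_class, flatMap_tokB_rest]
  have hstep : (fun (acc : List String) (kv : String × String) =>
      if pvUseSepA [" ", ":", "-", ";"] kv.2 then acc ++ [kv.1 ++ "='" ++ kv.2 ++ "'"]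
      else acc ++ [kv.1 ++ "=" ++ kv.2])
      = fun acc kv => acc ++ [pvFmt kv] := by
    funext acc kv
    rw [useSepA_eq_quoteB]
    unfold pvFmt
    split_ifs <;> rfl
  rw [hstep, PySem.List.foldl_append_singleton_eq_map]
  rw [erase_if attrs "id", erase_if (attrs.filter (fun p => !(p.1 == "id"))) "class"]
  refine congrArg (fun t => "{{" ++ PySem.Str.join " " t ++ "}}") ?_
  simp only [List.nil_append]
  rw [if_append_right, bucket_id attrs hpre,
      bucket_class (attrs.filter (fun p => !(p.1 == "id"))) (nodup_filter_fst attrs _ hpre),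
      filter_filter_class attrs, filter_filter_rest attrs, List.append_assoc]
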